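-- pv_equiv track=rewrite | github.com/SlothKun/AdventOfCode2021 | day08/mainPart2.py | applyPhaseOne
-- ===== SOURCE A (Python) =====
-- import itertools
--
-- lenToDigitDict = {
--     2:[1],
--     3:[7],
--     4:[4],
--     5:[2, 5, 3],
--     6:[6, 0, 9],
--     7:[8]
-- }
--
-- digitConfigDict = {
--     0: [0,1,2,4,5,6],
--     1: [2,5],
--     2: [0,2,3,4,6],
--     3: [0,2,3,5,6],
--     4: [1,2,3,5],
--     5: [0,1,3,5,6],
--     6: [0,1,3,4,5,6],
--     7: [0,2,5],
--     8: [0,1,2,3,4,5,6],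
--     9: [0,1,2,3,5,6]
-- }
--
-- def permuteString(pattern):
--     # Create every combinaison of the string (without duplicating letters)
--     return [''.join(comb) for comb in itertools.permutations(pattern)]
--
-- def applyFilter(permutations, digit, segmentFilter):
--     digitConfig = digitConfigDict[digit]
--     filteredPermutations = []
--     for permutation in permutations:
--         validPermutation = True
--         for segmentIndex, segment in enumerate(permutation):
--             pos = digitConfig[segmentIndex]
--             if segment not in segmentFilter[pos] and len(segmentFilter[pos]) != 0:
--                 validPermutation = False
--         if validPermutation and permutation not in filteredPermutations:
--             filteredPermutations.append(permutation)
--     return filteredPermutations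
--
-- def updateFilter(permutations, digitConfig, segmentFilter):
--     for permutation in permutations:
--         for segmentIndex, segment in enumerate(permutation):
--             pos = digitConfig[segmentIndex]
--             if segment not in segmentFilter[pos]:
--                 segmentFilter[pos].append(segment)
--     return segmentFilter
--
-- def applyPhaseOne(signalPattern):
--     currentLen = 2 # We will start with the len 2
--     permutations = {} # Permuted patterns
--     filteredPermutations = {} # Permuted patterns on which the filter applied
--     segmentFilter = {0:[],1:[],2:[],3:[],4:[],5:[],6:[]} # Filter
--
--     for pattern in signalPattern:
--         # Only if every pattern of the given length have been permuted & filtered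
--         # Save filtered pattern for later use
--         # Update filter with the new elements
--         # The filter won't be perfect but will be cleaned later on
--         if len(pattern) != currentLen:
--             for digit, permut in permutations.items():
--                 filteredPermutations[digit] = permut
--                 digitConfig = digitConfigDict[digit]
--                 segmentFilter = updateFilter(permut, digitConfig, segmentFilter)
--             permutations = {}
--             currentLen = len(pattern)
--
--         # (Ignore if this is the end)
--         # Permute the given pattern and apply a filter on the permuted list
--         # This greatly reduce the nb of data that will need to be process later on
--         if len(pattern) != 0:
--             digits = lenToDigitDict[len(pattern)]
--             for digit in digits:
--                 tmpPermutations = permuteString(pattern)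
--                 if digit not in permutations.keys():
--                     permutations[digit] = []
--                 if len(pattern) != 2: # Filter is empty in the first cycle
--                     tmpPermutations = applyFilter(tmpPermutations, digit, segmentFilter)
--                 permutations[digit] += tmpPermutations
--     return filteredPermutations, segmentFilter
-- ===== SOURCE B (Python) =====
-- lenToDigitDict = {
--     2:[1],
--     3:[7],
--     4:[4],
--     5:[2, 5, 3],
--     6:[6, 0, 9],
--     7:[8]
-- }
--
-- digitConfigDict = {
--     0: [0,1,2,4,5,6],
--     1: [2,5],
--     2: [0,2,3,4,6],
--     3: [0,2,3,5,6],
--     4: [1,2,3,5],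
--     5: [0,1,3,5,6],
--     6: [0,1,3,4,5,6],
--     7: [0,2,5],
--     8: [0,1,2,3,4,5,6],
--     9: [0,1,2,3,5,6]
-- }
--
-- def _consistent(prefix, remaining, cells):
--     # Recursive backtracking: build permutations character by character, pruning
--     # any branch whose next character violates the segment filter (cells=None: no filter).
--     if not remaining:
--         return [prefix]
--     out = []
--     for j, ch in enumerate(remaining):
--         if cells is not None:
--             cell = cells[len(prefix)]
--             if cell and ch not in cell:
--                 continue
--         out.extend(_consistent(prefix + ch, remaining[:j] + remaining[j+1:], cells))
--     return out
--
-- def applyPhaseOne(signalPattern):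
--     currentLen = 2
--     permutations = {}
--     filteredPermutations = {}
--     segmentFilter = {i: [] for i in range(7)}
--
--     for pattern in signalPattern:
--         if len(pattern) != currentLen:
--             # Flush: record the finished group and grow the filter COLUMN-wise
--             # (per segment position, scanning that column of every permutation).
--             for digit, permut in permutations.items():
--                 filteredPermutations[digit] = permut
--                 for i, pos in enumerate(digitConfigDict[digit]):
--                     cell = segmentFilter[pos]
--                     for p in permut:
--                         if p[i] not in cell:
--                             cell.append(p[i])
--             permutations = {}
--             currentLen = len(pattern)
--
--         if len(pattern) != 0:
--             for digit in lenToDigitDict[len(pattern)]: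
--                 if len(pattern) != 2:
--                     cells = [segmentFilter[pos] for pos in digitConfigDict[digit]]
--                     tmp = list(dict.fromkeys(_consistent('', pattern, cells)))
--                 else:
--                     tmp = _consistent('', pattern, None)
--                 if digit in permutations:
--                     permutations[digit] += tmp
--                 else:
--                     permutations[digit] = tmp
--     return filteredPermutations, segmentFilter
-- ===== Notes on version B (the rewrite author's own statement) =====
-- stated objective: alternative
-- what changed: B never materializes invalid permutations: instead of A's generate-all-permutations-then-filter-then-dedupe pipeline (itertools.permutations + applyFilter), B builds each candidate by recursive backtracking, pruning a branch as soon as the next character violates the segment filter, and dedupes via dict.fromkeys; the filter flush is rebuilt column-wise (per segment position over all permutations) instead of A's row-wise updateFilter.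
import Mathlib
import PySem

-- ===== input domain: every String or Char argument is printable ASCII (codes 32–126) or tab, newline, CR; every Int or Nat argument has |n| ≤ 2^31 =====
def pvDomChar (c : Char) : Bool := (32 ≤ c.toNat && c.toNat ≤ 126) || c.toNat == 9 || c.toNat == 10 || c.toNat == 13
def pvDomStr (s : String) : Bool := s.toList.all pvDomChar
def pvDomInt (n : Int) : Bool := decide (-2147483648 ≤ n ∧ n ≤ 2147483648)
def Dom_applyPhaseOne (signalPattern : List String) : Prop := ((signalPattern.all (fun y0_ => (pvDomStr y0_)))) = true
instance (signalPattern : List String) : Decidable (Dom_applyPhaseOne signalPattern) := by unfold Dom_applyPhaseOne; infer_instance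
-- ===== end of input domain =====

-- B replaces A's generate-all-permutations-then-filter-then-dedupe pipeline by recursive
-- backtracking that prunes invalid branches while building each permutation, and grows the
-- segment filter column-wise; an alternative algorithm, no speed claim.

-- ===== PORT A =====
def digitConfigDict (digit : Int) : List Int :=
  if digit = 0 then [0,1,2,4,5,6]
  else if digit = 1 then [2,5]
  else if digit = 2 then [0,2,3,4,6]
  else if digit = 3 then [0,2,3,5,6]
  else if digit = 4 then [1,2,3,5]
  else if digit = 5 then [0,1,3,5,6]
  else if digit = 6 then [0,1,3,4,5,6]
  else if digit = 7 then [0,2,5]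
  else if digit = 8 then [0,1,2,3,4,5,6]
  else [0,1,2,3,5,6]  -- digit = 9; the dict is only ever consulted for digits 0..9

def lenToDigitDict (n : Nat) : List Int :=
  if n = 2 then [1] else if n = 3 then [7] else if n = 4 then [4]
  else if n = 5 then [2,5,3] else if n = 6 then [6,0,9] else [8]
  -- n = 7; Pre_ keeps consulted keys in 2..7 (Python raises KeyError on other lengths)

def permuteString (pattern : String) : List String :=
  (PySem.List.permutations pattern.toList pattern.toList.length).map (fun comb => String.ofList comb)

def applyFilter (permutations : List String) (digit : Int)
    (segmentFilter : PySem.Dict Int (List String)) : List String :=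
  let digitConfig := digitConfigDict digit
  permutations.foldl (fun filteredPermutations permutation =>
    let validPermutation := (PySem.List.enumerate permutation.toList).foldl (fun valid ic =>
      let pos := (PySem.List.pyGet? digitConfig ic.1).getD 0  -- index in range on every call made
      let cell := segmentFilter.getD pos []                   -- key 0..6, always present
      if String.ofList [ic.2] ∉ cell ∧ cell ≠ [] then false else valid) true
    if validPermutation = true ∧ permutation ∉ filteredPermutations
    then filteredPermutations ++ [permutation] else filteredPermutations) []

def updateFilter (permutations : List String) (digitConfig : List Int)
    (segmentFilter : PySem.Dict Int (List String)) : PySem.Dict Int (List String) :=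
  permutations.foldl (fun sf permutation =>
    (PySem.List.enumerate permutation.toList).foldl (fun sf ic =>
      let pos := (PySem.List.pyGet? digitConfig ic.1).getD 0
      let cell := sf.getD pos []
      if String.ofList [ic.2] ∉ cell then sf.insert pos (cell ++ [String.ofList [ic.2]]) else sf) sf)
    segmentFilter

def initialSegmentFilter : PySem.Dict Int (List String) :=
  PySem.Dict.ofList [(0,[]),(1,[]),(2,[]),(3,[]),(4,[]),(5,[]),(6,[])]

def stepA
    (st : Int × PySem.Dict Int (List String) × PySem.Dict Int (List String) × PySem.Dict Int (List String))
    (pattern : String) :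
    Int × PySem.Dict Int (List String) × PySem.Dict Int (List String) × PySem.Dict Int (List String) :=
  let st :=
    if (pattern.toList.length : Int) ≠ st.1 then
      let fs := st.2.1.items.foldl
        (fun (fs : PySem.Dict Int (List String) × PySem.Dict Int (List String)) dp =>
          (fs.1.insert dp.1 dp.2, updateFilter dp.2 (digitConfigDict dp.1) fs.2))
        (st.2.2.1, st.2.2.2)
      ((pattern.toList.length : Int), PySem.Dict.empty, fs.1, fs.2)
    else st
  if pattern.toList.length ≠ 0 then
    let permutations := (lenToDigitDict pattern.toList.length).foldl (fun permutations digit =>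
      let tmpPermutations := permuteString pattern
      let permutations :=
        if permutations.contains digit then permutations else permutations.insert digit []
      let tmpPermutations :=
        if pattern.toList.length ≠ 2 then applyFilter tmpPermutations digit st.2.2.2
        else tmpPermutations
      permutations.insert digit (permutations.getD digit [] ++ tmpPermutations)) st.2.1
    (st.1, permutations, st.2.2.1, st.2.2.2)
  else st

def applyPhaseOne (signalPattern : List String) :
    (List (Int × List String)) × (List (Int × List String)) :=
  let r := signalPattern.foldl stepA
    ((2 : Int), PySem.Dict.empty, PySem.Dict.empty, initialSegmentFilter)
  (r.2.2.1.items, r.2.2.2.items)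

-- ===== PORT B =====
-- _consistent: backtracking generator, prunes branches the filter forbids
def consB (cells : Option (List (List String))) : Nat → List Char → List Char → List String
  | _, pfx, [] => [String.ofList pfx]
  | 0, _, _ => []   -- fuel (called with fuel = remaining.length, so never hit)
  | n+1, pfx, remaining =>
    (PySem.List.enumerate remaining).foldl (fun out jc =>
      let skip :=
        match cells with
        | none => false
        | some cs =>
          let cell := (PySem.List.pyGet? cs (pfx.length : Int)).getD []
          !cell.isEmpty && !cell.contains (String.ofList [jc.2])
      if skip = true then out
      else out ++ consB cells n (pfx ++ [jc.2])
        (PySem.List.slice remaining none (some jc.1) ++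
         PySem.List.slice remaining (some (jc.1 + 1)) none)) []

def stepB
    (st : Int × PySem.Dict Int (List String) × PySem.Dict Int (List String) × PySem.Dict Int (List String))
    (pattern : String) :
    Int × PySem.Dict Int (List String) × PySem.Dict Int (List String) × PySem.Dict Int (List String) :=
  let st :=
    if (pattern.toList.length : Int) ≠ st.1 then
      let fs := st.2.1.items.foldl
        (fun (fs : PySem.Dict Int (List String) × PySem.Dict Int (List String)) dp =>
          (fs.1.insert dp.1 dp.2,
           -- column-wise: per segment position, scan that column of every permutation
           (PySem.List.enumerate (digitConfigDict dp.1)).foldl (fun sf ip =>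
             dp.2.foldl (fun sf p =>
               let c := String.ofList [(PySem.List.pyGet? p.toList ip.1).getD ' ']
               let cell := sf.getD ip.2 []
               if c ∉ cell then sf.insert ip.2 (cell ++ [c]) else sf) sf) fs.2))
        (st.2.2.1, st.2.2.2)
      ((pattern.toList.length : Int), PySem.Dict.empty, fs.1, fs.2)
    else st
  if pattern.toList.length ≠ 0 then
    let permutations := (lenToDigitDict pattern.toList.length).foldl (fun permutations digit =>
      let tmp :=
        if pattern.toList.length ≠ 2 then
          PySem.List.dedup (consB
            (some ((digitConfigDict digit).map (fun pos => st.2.2.2.getD pos [])))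
            pattern.toList.length [] pattern.toList)
        else consB none pattern.toList.length [] pattern.toList
      if permutations.contains digit then
        permutations.insert digit (permutations.getD digit [] ++ tmp)
      else permutations.insert digit tmp) st.2.1
    (st.1, permutations, st.2.2.1, st.2.2.2)
  else st

def applyPhaseOne_alt (signalPattern : List String) :
    (List (Int × List String)) × (List (Int × List String)) :=
  let r := signalPattern.foldl stepB
    ((2 : Int), PySem.Dict.empty, PySem.Dict.empty, initialSegmentFilter)
  (r.2.2.1.items, r.2.2.2.items)

-- ===== PRECONDITION & SPEC =====
-- Pre_ excludes exactly the inputs on which Python A raises KeyError: a pattern whose length is 1 or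
-- exceeds 7 hits a missing key of lenToDigitDict.
def Pre_applyPhaseOne (signalPattern : List String) : Prop :=
  ∀ s ∈ signalPattern, s.toList.length ∈ ([0, 2, 3, 4, 5, 6, 7] : List Nat)
instance (signalPattern : List String) : Decidable (Pre_applyPhaseOne signalPattern) := by
  unfold Pre_applyPhaseOne; infer_instance

def pvWitness_applyPhaseOne : List String := ["ab", "abc"]

def Spec_applyPhaseOne (signalPattern : List String)
    (out : (List (Int × List String)) × (List (Int × List String))) : Prop :=
  out = applyPhaseOne_alt signalPattern
instance (signalPattern : List String) (out : (List (Int × List String)) × (List (Int × List String))) :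
    Decidable (Spec_applyPhaseOne signalPattern out) := by unfold Spec_applyPhaseOne; infer_instance

-- ===== CLAIM (what is proved, stated in full; the proofs are below) =====
def Claim_equal_applyPhaseOne : Prop := ∀ (signalPattern : List String),
  Dom_applyPhaseOne signalPattern → Pre_applyPhaseOne signalPattern →
  Spec_applyPhaseOne signalPattern (applyPhaseOne signalPattern)

-- ===== LEMMAS AND PROOFS =====

-- ---- abstract update step on the filter dict and its per-key behaviour ----
def updC (d : PySem.Dict Int (List String)) (s : Int × String) : PySem.Dict Int (List String) :=
  let cell := d.getD s.1 []
  if s.2 ∉ cell then d.insert s.1 (cell ++ [s.2]) else d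

def cellAdd (cell : List String) (c : String) : List String :=
  if c ∉ cell then cell ++ [c] else cell

lemma getD_updC (d : PySem.Dict Int (List String)) (s : Int × String) (k : Int) :
    (updC d s).getD k [] = if k = s.1 then cellAdd (d.getD s.1 []) s.2 else d.getD k [] := by
  unfold updC cellAdd
  by_cases hmem : s.2 ∈ d.getD s.1 []
  · simp only [hmem, not_true_eq_false, if_false]
    split <;> simp_all
  · simp [hmem, PySem.Dict.getD_insert]

lemma getD_updC_fold (steps : List (Int × String)) (d : PySem.Dict Int (List String)) (k : Int) :
    (steps.foldl updC d).getD k [] =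
      (steps.filter (fun s => s.1 == k)).foldl (fun cell s => cellAdd cell s.2) (d.getD k []) := by
  induction steps generalizing d with
  | nil => simp
  | cons s t ih =>
    rw [List.foldl_cons, ih, List.filter_cons]
    by_cases hk : s.1 = k
    · simp only [hk, BEq.rfl, if_pos, List.foldl_cons]
      rw [getD_updC, if_pos hk.symm, hk]
    · have : (s.1 == k) = false := by simp [hk]
      rw [this, if_neg (by simp), getD_updC, if_neg (fun h => hk h.symm)]

lemma keys_updC (d : PySem.Dict Int (List String)) (s : Int × String)
    (h : d.contains s.1 = true) : (updC d s).keys = d.keys := by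
  unfold updC
  by_cases hmem : s.2 ∈ d.getD s.1 []
  · simp [hmem]
  · simp [hmem, PySem.Dict.keys_insert_of_contains d _ h]

lemma contains_updC (d : PySem.Dict Int (List String)) (s : Int × String) (k : Int)
    (h : d.contains k = true) : (updC d s).contains k = true := by
  unfold updC
  by_cases hmem : s.2 ∈ d.getD s.1 []
  · simpa [hmem]
  · simp [hmem, PySem.Dict.contains_insert, h]

lemma keys_updC_fold (steps : List (Int × String)) (d : PySem.Dict Int (List String))
    (h : ∀ s ∈ steps, d.contains s.1 = true) :
    (steps.foldl updC d).keys = d.keys := by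
  induction steps generalizing d with
  | nil => rfl
  | cons s t ih =>
    rw [List.foldl_cons, ih _ (fun x hx => contains_updC d s x.1 (h x (by simp [hx]))),
      keys_updC d s (h s (by simp))]

lemma updC_fold_ext (steps1 steps2 : List (Int × String)) (d : PySem.Dict Int (List String))
    (hnd : d.keys.Nodup)
    (h1 : ∀ s ∈ steps1, d.contains s.1 = true) (h2 : ∀ s ∈ steps2, d.contains s.1 = true)
    (hproj : ∀ k : Int, steps1.filter (fun s => s.1 == k) = steps2.filter (fun s => s.1 == k)) :
    steps1.foldl updC d = steps2.foldl updC d := by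
  have hk1 := keys_updC_fold steps1 d h1
  have hk2 := keys_updC_fold steps2 d h2
  apply PySem.Dict.ext
  rw [PySem.Dict.items_eq_map_keys _ (by rw [hk1]; exact hnd) [],
    PySem.Dict.items_eq_map_keys _ (by rw [hk2]; exact hnd) [], hk1, hk2]
  refine List.map_congr_left (fun k _ => ?_)
  rw [getD_updC_fold, getD_updC_fold, hproj]

-- ---- the two filter-update loops as updC folds ----
def rowSteps (cfg : List Int) (p : String) : List (Int × String) :=
  (PySem.List.enumerate p.toList).map
    (fun ic => ((PySem.List.pyGet? cfg ic.1).getD 0, String.ofList [ic.2]))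

def colSteps (perms : List String) (ip : Int × Int) : List (Int × String) :=
  perms.map (fun p => (ip.2, String.ofList [(PySem.List.pyGet? p.toList ip.1).getD ' ']))

lemma updateFilter_eq_fold (perms : List String) (cfg : List Int)
    (sf : PySem.Dict Int (List String)) :
    updateFilter perms cfg sf = (perms.flatMap (rowSteps cfg)).foldl updC sf := by
  unfold updateFilter
  rw [List.foldl_flatMap]
  refine PySem.List.foldl_congr_mem perms _ _ sf (fun acc p _ => ?_)
  unfold rowSteps
  rw [List.foldl_map]
  rfl

lemma colUpdate_eq_fold (perms : List String) (cfg : List Int)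
    (sf : PySem.Dict Int (List String)) :
    (PySem.List.enumerate cfg).foldl (fun sf ip =>
        perms.foldl (fun sf p =>
          let c := String.ofList [(PySem.List.pyGet? p.toList ip.1).getD ' ']
          let cell := sf.getD ip.2 []
          if c ∉ cell then sf.insert ip.2 (cell ++ [c]) else sf) sf) sf
      = ((PySem.List.enumerate cfg).flatMap (colSteps perms)).foldl updC sf := by
  rw [List.foldl_flatMap]
  refine PySem.List.foldl_congr_mem _ _ _ sf (fun acc ip _ => ?_)
  unfold colSteps
  rw [List.foldl_map]
  rfl

lemma proj_row_col (perms : List String) (cfg : List Int) (hnd : cfg.Nodup)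
    (hlen : ∀ p ∈ perms, p.toList.length = cfg.length) (k : Int) :
    (perms.flatMap (rowSteps cfg)).filter (fun s => s.1 == k) =
      ((PySem.List.enumerate cfg).flatMap (colSteps perms)).filter (fun s => s.1 == k) := by
  rw [List.filter_flatMap, List.filter_flatMap]
  by_cases hkmem : k ∈ cfg
  · -- cfg = u ++ k :: v with k in neither side
    obtain ⟨u, v, hcfg⟩ := List.append_of_mem hkmem
    subst hcfg
    have hnd' := hnd
    simp only [List.nodup_append, List.nodup_cons] at hnd'
    have hu : k ∉ u := fun h => hnd'.2.2 k h k (by simp) rfl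
    have hv : k ∉ v := hnd'.2.1.1
    -- the key k sits at index u.length of cfg
    have hget_mid : (PySem.List.pyGet? (u ++ k :: v) ((u.length : Nat) : Int)).getD 0 = k := by
      rw [PySem.List.pyGet?_natCast, List.getElem?_append_right (Nat.le_refl _)]
      simp
    have hget_u : ∀ i : Nat, i < u.length →
        (((PySem.List.pyGet? (u ++ k :: v) ((i : Nat) : Int)).getD 0 == k) = false) := by
      intro i hi
      rw [PySem.List.pyGet?_natCast, List.getElem?_append_left hi]
      have : u[i] ≠ k := fun h => hu (h ▸ List.getElem_mem hi)
      simp [List.getElem?_eq_getElem hi, this]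
    have hget_v : ∀ i : Nat, i < v.length →
        (((PySem.List.pyGet? (u ++ k :: v) ((u.length + 1 + i : Nat) : Int)).getD 0 == k) = false) := by
      intro i hi
      rw [PySem.List.pyGet?_natCast,
        List.getElem?_append_right (by omega)]
      have h1 : u.length + 1 + i - u.length = i + 1 := by omega
      rw [h1]
      have : v[i] ≠ k := fun h => hv (h ▸ List.getElem_mem hi)
      simp [List.getElem?_eq_getElem hi, this]
    -- row side: per permutation exactly one kept pair
    have hrow : ∀ p ∈ perms, (rowSteps (u ++ k :: v) p).filter (fun s => s.1 == k) =
        [(k, String.ofList [p.toList.getD u.length ' '])] := by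
      intro p hp
      have hplen := hlen p hp
      simp only [List.length_append, List.length_cons] at hplen
      have hul : u.length < p.toList.length := by omega
      have hsplit : p.toList = p.toList.take u.length ++ p.toList[u.length] :: p.toList.drop (u.length + 1) := by
        conv_lhs => rw [← List.take_append_drop u.length p.toList]
        rw [List.drop_eq_getElem_cons hul]
      have hxlen : (p.toList.take u.length).length = u.length := by
        rw [List.length_take]; omega
      unfold rowSteps
      rw [List.filter_map]
      conv_lhs => rw [hsplit]
      rw [PySem.List.enumerate_append, PySem.List.enumerate_cons, List.filter_append,
        List.filter_cons]
      have hz1 : (List.filter ((fun s => s.1 == k) ∘ fun ic =>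
          ((PySem.List.pyGet? (u ++ k :: v) ic.1).getD 0, String.ofList [ic.2]))
          (PySem.List.enumerate (p.toList.take u.length) 0)) = [] := by
        rw [List.filter_eq_nil_iff]
        intro ic hic
        obtain ⟨i, hi, hic⟩ := (PySem.List.mem_enumerate_iff _ _ _).mp hic
        subst hic
        simp only [Function.comp, zero_add]
        rw [hxlen] at hi
        have hne : u[i] ≠ k := fun h => hu (h ▸ List.getElem_mem hi)
        simp [List.getElem?_append_left hi, List.getElem?_eq_getElem hi, hne]
      have hz2 : (List.filter ((fun s => s.1 == k) ∘ fun ic =>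
          ((PySem.List.pyGet? (u ++ k :: v) ic.1).getD 0, String.ofList [ic.2]))
          (PySem.List.enumerate (p.toList.drop (u.length + 1)) (0 + ↑(p.toList.take u.length).length + 1))) = [] := by
        rw [List.filter_eq_nil_iff]
        intro ic hic
        obtain ⟨i, hi, hic⟩ := (PySem.List.mem_enumerate_iff _ _ _).mp hic
        subst hic
        have hilen : i < v.length := by
          have := List.length_drop (l := p.toList) (i := u.length + 1)
          omega
        simp only [Function.comp, hxlen, zero_add]
        have hcast : (u.length : Int) + 1 + (i : Int) = ((u.length + 1 + i : Nat) : Int) := by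
          push_cast; ring
        have hne : v[i] ≠ k := fun h => hv (h ▸ List.getElem_mem hilen)
        rw [hcast]
        simp only [PySem.List.pyGet?_natCast]
        rw [List.getElem?_append_right (by omega)]
        have h1 : u.length + 1 + i - u.length = i + 1 := by omega
        rw [h1]
        simp [List.getElem?_eq_getElem hilen, hne]
      rw [hz1, hz2]
      simp only [Function.comp, zero_add, hxlen]
      rw [if_pos (by rw [hget_mid]; exact BEq.rfl)]
      simp [List.getD_eq_getElem?_getD, List.getElem?_eq_getElem hul]
    -- column side: only the middle entry of enumerate cfg survives
    rw [show PySem.List.enumerate (u ++ k :: v) 0 =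
        PySem.List.enumerate u 0 ++ ((u.length : Int), k) :: PySem.List.enumerate v ((u.length : Int) + 1) from by
      rw [PySem.List.enumerate_append, PySem.List.enumerate_cons]; norm_num]
    rw [List.flatMap_append, List.flatMap_cons]
    have hzc1 : (PySem.List.enumerate u 0).flatMap
        (fun ip => (colSteps perms ip).filter (fun s => s.1 == k)) = [] := by
      rw [List.flatMap_eq_nil_iff]
      intro ip hip
      obtain ⟨i, hi, hip⟩ := (PySem.List.mem_enumerate_iff _ _ _).mp hip
      subst hip
      unfold colSteps
      rw [List.filter_eq_nil_iff]
      intro s hs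
      simp only [List.mem_map] at hs
      obtain ⟨p, _, hps⟩ := hs
      subst hps
      have : u[i] ≠ k := fun h => hu (h ▸ List.getElem_mem hi)
      simp [this]
    have hzc2 : (PySem.List.enumerate v ((u.length : Int) + 1)).flatMap
        (fun ip => (colSteps perms ip).filter (fun s => s.1 == k)) = [] := by
      rw [List.flatMap_eq_nil_iff]
      intro ip hip
      obtain ⟨i, hi, hip⟩ := (PySem.List.mem_enumerate_iff _ _ _).mp hip
      subst hip
      unfold colSteps
      rw [List.filter_eq_nil_iff]
      intro s hs
      simp only [List.mem_map] at hs
      obtain ⟨p, _, hps⟩ := hs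
      subst hps
      have : v[i] ≠ k := fun h => hv (h ▸ List.getElem_mem hi)
      simp [this]
    have hmid : (colSteps perms ((u.length : Int), k)).filter (fun s => s.1 == k) =
        perms.map (fun p => (k, String.ofList [p.toList.getD u.length ' '])) := by
      unfold colSteps
      rw [List.filter_map]
      rw [List.filter_eq_self.mpr (by intro a _; exact BEq.rfl)]
      refine List.map_congr_left (fun p hp => ?_)
      have hplen := hlen p hp
      simp only [List.length_append, List.length_cons] at hplen
      have hul : u.length < p.toList.length := by omega
      rw [PySem.List.pyGet?_natCast, List.getD_eq_getElem?_getD]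
    rw [hzc1, hzc2, hmid]
    simp only [List.nil_append, List.append_nil]
    rw [List.flatMap_congr hrow, ← List.map_eq_flatMap]
  · -- k occurs nowhere: both sides are empty
    have hrow : ∀ p ∈ perms, (rowSteps cfg p).filter (fun s => s.1 == k) = [] := by
      intro p hp
      unfold rowSteps
      rw [List.filter_map, List.map_eq_nil_iff, List.filter_eq_nil_iff]
      intro ic hic
      obtain ⟨i, hi, hic⟩ := (PySem.List.mem_enumerate_iff _ _ _).mp hic
      subst hic
      have hi' : i < cfg.length := by rw [← hlen p hp]; exact hi
      simp only [Function.comp, zero_add]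
      rw [PySem.List.pyGet?_natCast, List.getElem?_eq_getElem hi']
      have : cfg[i] ≠ k := fun h => hkmem (h ▸ List.getElem_mem hi')
      simp [this]
    have hcol : ∀ ip ∈ PySem.List.enumerate cfg 0,
        (colSteps perms ip).filter (fun s => s.1 == k) = [] := by
      intro ip hip
      obtain ⟨i, hi, hip⟩ := (PySem.List.mem_enumerate_iff _ _ _).mp hip
      subst hip
      unfold colSteps
      rw [List.filter_map, List.map_eq_nil_iff, List.filter_eq_nil_iff]
      intro p _
      have : cfg[i] ≠ k := fun h => hkmem (h ▸ List.getElem_mem hi)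
      simp [Function.comp, this]
    rw [List.flatMap_eq_nil_iff.mpr ?_, List.flatMap_eq_nil_iff.mpr ?_]
    · exact fun ip hip => hcol ip hip
    · exact fun p hp => hrow p hp

def sevenKeys : List Int := [0, 1, 2, 3, 4, 5, 6]

lemma cfg_nodup (digit : Int) : (digitConfigDict digit).Nodup := by
  unfold digitConfigDict; split_ifs <;> decide

lemma cfg_mem_seven (digit : Int) : ∀ x ∈ digitConfigDict digit, x ∈ sevenKeys := by
  unfold digitConfigDict; split_ifs <;> decide

-- row/column filter updates agree (and keep the keys) on a filter with keys 0..6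
lemma flush_one_eq (perms : List String) (digit : Int) (sf : PySem.Dict Int (List String))
    (hk : sf.keys = sevenKeys)
    (hlen : ∀ p ∈ perms, p.toList.length = (digitConfigDict digit).length) :
    updateFilter perms (digitConfigDict digit) sf =
      (PySem.List.enumerate (digitConfigDict digit)).foldl (fun sf ip =>
        perms.foldl (fun sf p =>
          let c := String.ofList [(PySem.List.pyGet? p.toList ip.1).getD ' ']
          let cell := sf.getD ip.2 []
          if c ∉ cell then sf.insert ip.2 (cell ++ [c]) else sf) sf) sf := by
  rw [updateFilter_eq_fold, colUpdate_eq_fold]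
  refine updC_fold_ext _ _ sf (by rw [hk]; decide) ?_ ?_
    (proj_row_col perms _ (cfg_nodup digit) hlen)
  · intro s hs
    rw [List.mem_flatMap] at hs
    obtain ⟨p, _, hs⟩ := hs
    unfold rowSteps at hs
    rw [List.mem_map] at hs
    obtain ⟨ic, _, hic⟩ := hs
    subst hic
    rw [PySem.Dict.contains_iff_mem_keys, hk]
    rcases hg : PySem.List.pyGet? (digitConfigDict digit) ic.1 with _ | x
    · simp [sevenKeys]
    · simpa [hg] using cfg_mem_seven digit x (PySem.List.mem_of_pyGet?_eq_some _ hg)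
  · intro s hs
    rw [List.mem_flatMap] at hs
    obtain ⟨ip, hip, hs⟩ := hs
    unfold colSteps at hs
    rw [List.mem_map] at hs
    obtain ⟨p, _, hps⟩ := hs
    subst hps
    obtain ⟨i, hi, hip⟩ := (PySem.List.mem_enumerate_iff _ _ _).mp hip
    subst hip
    rw [PySem.Dict.contains_iff_mem_keys, hk]
    exact cfg_mem_seven digit _ (List.getElem_mem hi)

lemma keys_updateFilter (perms : List String) (digit : Int) (sf : PySem.Dict Int (List String))
    (hk : sf.keys = sevenKeys) :
    (updateFilter perms (digitConfigDict digit) sf).keys = sevenKeys := by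
  rw [updateFilter_eq_fold, keys_updC_fold, hk]
  intro s hs
  rw [List.mem_flatMap] at hs
  obtain ⟨p, _, hs⟩ := hs
  unfold rowSteps at hs
  rw [List.mem_map] at hs
  obtain ⟨ic, _, hic⟩ := hs
  subst hic
  rw [PySem.Dict.contains_iff_mem_keys, hk]
  rcases hg : PySem.List.pyGet? (digitConfigDict digit) ic.1 with _ | x
  · simp [sevenKeys]
  · simpa [hg] using cfg_mem_seven digit x (PySem.List.mem_of_pyGet?_eq_some _ hg)

-- ---- the backtracking generator versus generate-then-filter ----
def okc (cells : Option (List (List String))) (d : Nat) (c : Char) : Bool :=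
  match cells with
  | none => true
  | some cs =>
    let cell := (PySem.List.pyGet? cs (d : Int)).getD []
    cell.isEmpty || cell.contains (String.ofList [c])

def validB (cells : Option (List (List String))) : Nat → List Char → Bool
  | _, [] => true
  | d, c :: q => okc cells d c && validB cells (d+1) q

lemma permutations_succ {α : Type} (xs : List α) (n : Nat) :
    PySem.List.permutations xs (n+1) =
      (List.range xs.length).flatMap (fun i =>
        xs[i]?.elim [] (fun c => (PySem.List.permutations (xs.eraseIdx i) n).map (fun p => c :: p))) := by
  conv_lhs => rw [PySem.List.permutations]
  congr 1
  funext i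
  cases h : xs[i]? <;> simp

lemma consB_spec (cells : Option (List (List String))) :
    ∀ (n : Nat) (pfx remaining : List Char), remaining.length = n →
    consB cells n pfx remaining =
      ((PySem.List.permutations remaining n).filter (fun q => validB cells pfx.length q)).map
        (fun q => String.ofList (pfx ++ q)) := by
  intro n
  induction n with
  | zero =>
    intro pfx remaining hlen
    rw [List.length_eq_zero_iff.mp hlen]
    simp [consB, PySem.List.permutations, validB]
  | succ n ih =>
    intro pfx remaining hlen
    rcases remaining with _ | ⟨r0, rs⟩
    · simp at hlen
    rw [show consB cells (n+1) pfx (r0 :: rs) =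
        (PySem.List.enumerate (r0 :: rs)).foldl (fun out jc =>
          let skip :=
            match cells with
            | none => false
            | some cs =>
              let cell := (PySem.List.pyGet? cs (pfx.length : Int)).getD []
              !cell.isEmpty && !cell.contains (String.ofList [jc.2])
          if skip = true then out
          else out ++ consB cells n (pfx ++ [jc.2])
            (PySem.List.slice (r0 :: rs) none (some jc.1) ++
             PySem.List.slice (r0 :: rs) (some (jc.1 + 1)) none)) [] from rfl]
    have hfold : ∀ (l : List (Int × Char)) (acc : List String),
        l.foldl (fun out jc =>
          let skip :=
            match cells with
            | none => false
            | some cs =>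
              let cell := (PySem.List.pyGet? cs (pfx.length : Int)).getD []
              !cell.isEmpty && !cell.contains (String.ofList [jc.2])
          if skip = true then out
          else out ++ consB cells n (pfx ++ [jc.2])
            (PySem.List.slice (r0 :: rs) none (some jc.1) ++
             PySem.List.slice (r0 :: rs) (some (jc.1 + 1)) none)) acc
        = acc ++ l.flatMap (fun jc =>
            if okc cells pfx.length jc.2 = false then []
            else consB cells n (pfx ++ [jc.2])
              (PySem.List.slice (r0 :: rs) none (some jc.1) ++
               PySem.List.slice (r0 :: rs) (some (jc.1 + 1)) none)) := by
      intro l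
      induction l with
      | nil => simp
      | cons jc t iht =>
        intro acc
        rw [List.foldl_cons, List.flatMap_cons, iht]
        rcases hc : cells with _ | cs
        · simp [okc, List.append_assoc]
        · simp only [okc, ← Bool.not_or, Bool.not_eq_true']
          by_cases hok : (((PySem.List.pyGet? cs (pfx.length : Int)).getD []).isEmpty
              || ((PySem.List.pyGet? cs (pfx.length : Int)).getD []).contains (String.ofList [jc.2])) = false
          · rw [if_pos hok, if_pos hok]; simp
          · rw [if_neg hok, if_neg hok]; simp [List.append_assoc]
    rw [hfold, List.nil_append]
    -- right-hand side: unfold one level of permutations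
    rw [permutations_succ]
    rw [List.filter_flatMap, List.map_flatMap]
    -- left-hand side: enumerate as a map over range
    rw [PySem.List.enumerate_eq_map_pyRange (r0 :: rs) ' ',
      show PySem.List.len (r0 :: rs) = ((r0 :: rs).length : Int) from by simp [PySem.List.len_eq],
      PySem.List.pyRange_zero_natCast, List.map_map, List.flatMap_map]
    refine List.flatMap_congr (fun i hi => ?_)
    rw [List.mem_range] at hi
    simp only [Function.comp]
    have hgd : PySem.List.pyGetD (r0 :: rs) ((i : Nat) : Int) ' ' = (r0 :: rs)[i] := by
      rw [PySem.List.pyGetD_natCast, List.getD_eq_getElem?_getD, List.getElem?_eq_getElem hi]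
      rfl
    have hsl : PySem.List.slice (r0 :: rs) none (some ((i : Nat) : Int)) ++
        PySem.List.slice (r0 :: rs) (some (((i : Nat) : Int) + 1)) none = (r0 :: rs).eraseIdx i := by
      rw [PySem.List.slice_to _ (by positivity),
        show ((i : Nat) : Int) + 1 = (((i + 1 : Nat)) : Int) from by push_cast; ring,
        PySem.List.slice_from _ (by positivity), Int.toNat_natCast, Int.toNat_natCast,
        List.eraseIdx_eq_take_drop_succ]
    have herase : ((r0 :: rs).eraseIdx i).length = n := by
      rw [List.length_eraseIdx, if_pos hi]
      omega
    rw [hgd, hsl, List.getElem?_eq_getElem hi, Option.elim_some]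
    rcases hok : okc cells pfx.length (r0 :: rs)[i] with _|_
    · rw [if_pos rfl]
      rw [List.filter_map]
      have : ∀ q ∈ PySem.List.permutations ((r0 :: rs).eraseIdx i) n,
          ((fun q => validB cells pfx.length q) ∘ (fun p => (r0 :: rs)[i] :: p)) q = false := by
        intro q _
        simp [Function.comp, validB, hok]
      rw [List.filter_eq_nil_iff.mpr (by intro a ha; rw [this a ha]; simp)]
      simp
    · rw [if_neg (by simp), ih (pfx ++ [(r0 :: rs)[i]]) _ herase]
      rw [List.filter_map, List.map_map]
      have hfeq : List.filter ((fun q => validB cells pfx.length q) ∘ (fun p => (r0 :: rs)[i] :: p))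
            (PySem.List.permutations ((r0 :: rs).eraseIdx i) n)
          = List.filter (fun q => validB cells (pfx ++ [(r0 :: rs)[i]]).length q)
            (PySem.List.permutations ((r0 :: rs).eraseIdx i) n) := by
        refine List.filter_congr (fun q _ => ?_)
        simp [Function.comp, validB, hok, List.length_append]
      rw [hfeq]
      refine List.map_congr_left (fun q _ => ?_)
      simp [Function.comp, List.append_assoc]

lemma validB_none (d : Nat) (q : List Char) : validB none d q = true := by
  induction q generalizing d <;> simp_all [validB, okc]

-- A's abort-on-bad-segment fold as an all()
lemma pv_valid_eq (cfg : List Int) (sf : PySem.Dict Int (List String))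
    (l : List (Int × Char)) (b : Bool) :
    l.foldl (fun valid ic =>
      let pos := (PySem.List.pyGet? cfg ic.1).getD 0
      let cell := sf.getD pos []
      if String.ofList [ic.2] ∉ cell ∧ cell ≠ [] then false else valid) b
    = (b && l.all (fun ic =>
        let cell := sf.getD ((PySem.List.pyGet? cfg ic.1).getD 0) []
        cell.isEmpty || cell.contains (String.ofList [ic.2]))) := by
  induction l generalizing b with
  | nil => simp
  | cons x xs ih =>
    rw [List.foldl_cons, List.all_cons, ih]
    by_cases h1 : String.ofList [x.2] ∈ sf.getD ((PySem.List.pyGet? cfg x.1).getD 0) []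
    · simp [h1]
    · by_cases h2 : sf.getD ((PySem.List.pyGet? cfg x.1).getD 0) [] = []
      · simp [h2]
      · have hc : (sf.getD ((PySem.List.pyGet? cfg x.1).getD 0) []).contains (String.ofList [x.2]) = false := by
          simp [h1]
        have he : (sf.getD ((PySem.List.pyGet? cfg x.1).getD 0) []).isEmpty = false := by
          simp [h2]
        simp [h1, h2, he]

-- A's validity test equals validB on strings of the config's length
lemma valid_eq_validB (cfg : List Int) (sf : PySem.Dict Int (List String)) :
    ∀ (q : List Char) (d : Nat), d + q.length ≤ cfg.length →
    (PySem.List.enumerate q (d : Int)).all (fun ic =>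
        let cell := sf.getD ((PySem.List.pyGet? cfg ic.1).getD 0) []
        cell.isEmpty || cell.contains (String.ofList [ic.2]))
      = validB (some (cfg.map (fun pos => sf.getD pos []))) d q := by
  intro q
  induction q with
  | nil => intro d _; simp [validB]
  | cons c t ih =>
    intro d hle
    rw [List.length_cons] at hle
    have hd : d < cfg.length := by omega
    rw [PySem.List.enumerate_cons, List.all_cons, validB]
    have h1 : (PySem.List.pyGet? cfg ((d : Nat) : Int)).getD 0 = cfg[d] := by
      rw [PySem.List.pyGet?_natCast, List.getElem?_eq_getElem hd]; rfl
    have h2 : okc (some (cfg.map (fun pos => sf.getD pos []))) d c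
        = ((sf.getD cfg[d] []).isEmpty || (sf.getD cfg[d] []).contains (String.ofList [c])) := by
      show (((PySem.List.pyGet? (cfg.map (fun pos => sf.getD pos [])) ((d : Nat) : Int)).getD []).isEmpty
        || ((PySem.List.pyGet? (cfg.map (fun pos => sf.getD pos [])) ((d : Nat) : Int)).getD []).contains
          (String.ofList [c])) = _
      rw [PySem.List.pyGet?_natCast, List.getElem?_map, List.getElem?_eq_getElem hd]
      rfl
    have h3 : ((d : Nat) : Int) + 1 = (((d + 1 : Nat)) : Int) := by push_cast; ring
    rw [h3, ih (d + 1) (by omega), h1, h2]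

-- A's filter-and-dedup fold is dedup of the filtered list
lemma foldl_dedup_filter (l : List String) (v : String → Bool) :
    l.foldl (fun acc p => if v p = true ∧ p ∉ acc then acc ++ [p] else acc) [] =
      PySem.List.dedup (l.filter v) := by
  rw [show PySem.List.dedup (l.filter v) = (l.filter v).foldl PySem.Set.add PySem.Set.empty from rfl,
    List.foldl_filter]
  refine PySem.List.foldl_congr_mem l _ _ _ (fun acc x _ => ?_)
  by_cases hv : v x = true
  · by_cases hmem : x ∈ acc
    · simp [hv, hmem, PySem.Set.add]
    · simp [hv, hmem, PySem.Set.add]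
  · simp [hv]

-- per-digit generated list: A's equals B's
lemma tmp_eq (pattern : String) (digit : Int) (sf : PySem.Dict Int (List String))
    (hL : pattern.toList.length = (digitConfigDict digit).length) :
    applyFilter (permuteString pattern) digit sf =
      PySem.List.dedup (consB
        (some ((digitConfigDict digit).map (fun pos => sf.getD pos [])))
        pattern.toList.length [] pattern.toList) := by
  rw [consB_spec _ pattern.toList.length [] pattern.toList rfl]
  unfold applyFilter
  set cells : List (List String) := (digitConfigDict digit).map (fun pos => sf.getD pos []) with hc
  have hbody : ∀ (acc : List String), ∀ x ∈ permuteString pattern,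
      (let validPermutation := (PySem.List.enumerate x.toList).foldl (fun valid ic =>
        let pos := (PySem.List.pyGet? (digitConfigDict digit) ic.1).getD 0
        let cell := sf.getD pos []
        if String.ofList [ic.2] ∉ cell ∧ cell ≠ [] then false else valid) true
      if validPermutation = true ∧ x ∉ acc then acc ++ [x] else acc)
      = if validB (some cells) 0 x.toList = true ∧ x ∉ acc then acc ++ [x] else acc := by
    intro acc x hx
    obtain ⟨q, hq, hxq⟩ := List.mem_map.mp hx
    have hqlen : q.length = (digitConfigDict digit).length := by
      rw [← hL, ← (PySem.List.perm_of_mem_permutations hq).length_eq]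
    simp only []
    rw [pv_valid_eq, Bool.true_and]
    subst hxq
    have hxl : (String.ofList q).toList = q := by simp
    have hv := valid_eq_validB (digitConfigDict digit) sf q 0 (by omega)
    simp only [Nat.cast_zero] at hv
    rw [hxl, hv]
  rw [PySem.List.foldl_congr_mem _ _ _ [] hbody,
    foldl_dedup_filter (permuteString pattern) (fun x => validB (some cells) 0 x.toList)]
  congr 1
  unfold permuteString
  rw [List.filter_map]
  have : ∀ q, ((fun x => validB (some cells) 0 x.toList) ∘ (fun comb => String.ofList comb)) q
      = validB (some cells) 0 q := by
    intro q; simp [Function.comp]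
  rw [List.filter_congr (fun q _ => this q)]
  simp

lemma tmp2_eq (pattern : String) :
    permuteString pattern = consB none pattern.toList.length [] pattern.toList := by
  rw [consB_spec none pattern.toList.length [] pattern.toList rfl,
    List.filter_eq_self.mpr (fun q _ => validB_none _ q)]
  unfold permuteString
  exact List.map_congr_left (fun q _ => by simp)

-- ---- invariants and the main induction ----
def InvP (pm : PySem.Dict Int (List String)) : Prop :=
  pm.keys.Nodup ∧ ∀ pr ∈ pm.items, ∀ p ∈ pr.2, p.toList.length = (digitConfigDict pr.1).length

lemma len_digit_cfg (L : Nat) (hL : L ∈ ([2,3,4,5,6,7] : List Nat)) :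
    ∀ digit ∈ lenToDigitDict L, (digitConfigDict digit).length = L := by
  fin_cases hL <;> decide

-- A's ensure-key-then-extend equals B's single conditional insert
lemma pv_insert_step (d : PySem.Dict Int (List String)) (k : Int) (v : List String) :
    (let d' := if d.contains k then d else d.insert k []
     d'.insert k (d'.getD k [] ++ v)) =
      if d.contains k then d.insert k (d.getD k [] ++ v) else d.insert k v := by
  by_cases h : d.contains k = true
  · simp [h]
  · have h' : d.contains k = false := by simpa using h
    simp only [h', Bool.false_eq_true, if_false]
    rw [PySem.Dict.getD_insert_self, PySem.Dict.insert_insert_self]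
    simp

def flushFoldA (items : List (Int × List String))
    (fs : PySem.Dict Int (List String) × PySem.Dict Int (List String)) :
    PySem.Dict Int (List String) × PySem.Dict Int (List String) :=
  items.foldl (fun fs dp => (fs.1.insert dp.1 dp.2, updateFilter dp.2 (digitConfigDict dp.1) fs.2)) fs

def flushFoldB (items : List (Int × List String))
    (fs : PySem.Dict Int (List String) × PySem.Dict Int (List String)) :
    PySem.Dict Int (List String) × PySem.Dict Int (List String) :=
  items.foldl (fun fs dp =>
    (fs.1.insert dp.1 dp.2,
     (PySem.List.enumerate (digitConfigDict dp.1)).foldl (fun sf ip =>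
       dp.2.foldl (fun sf p =>
         let c := String.ofList [(PySem.List.pyGet? p.toList ip.1).getD ' ']
         let cell := sf.getD ip.2 []
         if c ∉ cell then sf.insert ip.2 (cell ++ [c]) else sf) sf) fs.2)) fs

def genFoldA (pattern : String) (sf : PySem.Dict Int (List String))
    (pm : PySem.Dict Int (List String)) : PySem.Dict Int (List String) :=
  (lenToDigitDict pattern.toList.length).foldl (fun permutations digit =>
    let tmpPermutations := permuteString pattern
    let permutations :=
      if permutations.contains digit then permutations else permutations.insert digit []
    let tmpPermutations :=
      if pattern.toList.length ≠ 2 then applyFilter tmpPermutations digit sf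
      else tmpPermutations
    permutations.insert digit (permutations.getD digit [] ++ tmpPermutations)) pm

def genFoldB (pattern : String) (sf : PySem.Dict Int (List String))
    (pm : PySem.Dict Int (List String)) : PySem.Dict Int (List String) :=
  (lenToDigitDict pattern.toList.length).foldl (fun permutations digit =>
    let tmp :=
      if pattern.toList.length ≠ 2 then
        PySem.List.dedup (consB
          (some ((digitConfigDict digit).map (fun pos => sf.getD pos [])))
          pattern.toList.length [] pattern.toList)
      else consB none pattern.toList.length [] pattern.toList
    if permutations.contains digit then
      permutations.insert digit (permutations.getD digit [] ++ tmp)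
    else permutations.insert digit tmp) pm

lemma stepA_shape (c : Int) (pm fp sf : PySem.Dict Int (List String)) (pattern : String) :
    stepA (c, pm, fp, sf) pattern =
      (let st' : Int × PySem.Dict Int (List String) × PySem.Dict Int (List String) × PySem.Dict Int (List String) :=
        if (pattern.toList.length : Int) ≠ c then
          ((pattern.toList.length : Int), PySem.Dict.empty,
            (flushFoldA pm.items (fp, sf)).1, (flushFoldA pm.items (fp, sf)).2)
        else (c, pm, fp, sf)
       if pattern.toList.length ≠ 0 then
         (st'.1, genFoldA pattern st'.2.2.2 st'.2.1, st'.2.2.1, st'.2.2.2)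
       else st') := by
  simp only [stepA, flushFoldA, genFoldA]

lemma stepB_shape (c : Int) (pm fp sf : PySem.Dict Int (List String)) (pattern : String) :
    stepB (c, pm, fp, sf) pattern =
      (let st' : Int × PySem.Dict Int (List String) × PySem.Dict Int (List String) × PySem.Dict Int (List String) :=
        if (pattern.toList.length : Int) ≠ c then
          ((pattern.toList.length : Int), PySem.Dict.empty,
            (flushFoldB pm.items (fp, sf)).1, (flushFoldB pm.items (fp, sf)).2)
        else (c, pm, fp, sf)
       if pattern.toList.length ≠ 0 then
         (st'.1, genFoldB pattern st'.2.2.2 st'.2.1, st'.2.2.1, st'.2.2.2)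
       else st') := by
  simp only [stepB, flushFoldB, genFoldB]

lemma flush_fold_eq (items : List (Int × List String)) (fp sf : PySem.Dict Int (List String))
    (hk : sf.keys = sevenKeys)
    (hlen : ∀ pr ∈ items, ∀ p ∈ pr.2, p.toList.length = (digitConfigDict pr.1).length) :
    flushFoldA items (fp, sf) = flushFoldB items (fp, sf) ∧
      (flushFoldA items (fp, sf)).2.keys = sevenKeys := by
  induction items generalizing fp sf with
  | nil => exact ⟨rfl, hk⟩
  | cons dp t ih =>
    have h1 := flush_one_eq dp.2 dp.1 sf hk (hlen dp (by simp))
    have h2 := keys_updateFilter dp.2 dp.1 sf hk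
    unfold flushFoldA flushFoldB
    rw [List.foldl_cons, List.foldl_cons]
    have := ih (fp.insert dp.1 dp.2) (updateFilter dp.2 (digitConfigDict dp.1) sf) h2
      (fun pr hpr => hlen pr (by simp [hpr]))
    refine ⟨?_, this.2⟩
    rw [show ((fp.insert dp.1 dp.2, updateFilter dp.2 (digitConfigDict dp.1) sf) :
        PySem.Dict Int (List String) × PySem.Dict Int (List String)) =
      (fp.insert dp.1 dp.2,
       (PySem.List.enumerate (digitConfigDict dp.1)).foldl (fun sf ip =>
         dp.2.foldl (fun sf p =>
           let c := String.ofList [(PySem.List.pyGet? p.toList ip.1).getD ' ']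
           let cell := sf.getD ip.2 []
           if c ∉ cell then sf.insert ip.2 (cell ++ [c]) else sf) sf) sf) from by rw [h1]] at this ⊢
    exact this.1

lemma gen_eq (pattern : String) (sf pm : PySem.Dict Int (List String))
    (hdl : ∀ digit ∈ lenToDigitDict pattern.toList.length,
      (digitConfigDict digit).length = pattern.toList.length) :
    genFoldA pattern sf pm = genFoldB pattern sf pm := by
  unfold genFoldA genFoldB
  refine PySem.List.foldl_congr_mem _ _ _ pm (fun acc digit hd => ?_)
  simp only []
  rw [pv_insert_step]
  by_cases h2 : pattern.toList.length ≠ 2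
  · rw [if_pos h2, if_pos h2, tmp_eq pattern digit sf (hdl digit hd).symm]
  · rw [if_neg h2, if_neg h2, tmp2_eq pattern]

lemma mem_consB_len (pattern : String) (cells : Option (List (List String))) (x : String)
    (hx : x ∈ consB cells pattern.toList.length [] pattern.toList) :
    x.toList.length = pattern.toList.length := by
  rw [consB_spec cells pattern.toList.length [] pattern.toList rfl] at hx
  rw [List.mem_map] at hx
  obtain ⟨q, hq, hxq⟩ := hx
  rw [List.mem_filter] at hq
  have := (PySem.List.perm_of_mem_permutations hq.1).length_eq
  subst hxq
  simpa using this

lemma gen_inv_aux (pattern : String) (sf : PySem.Dict Int (List String)) :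
    ∀ (dl : List Int) (pm : PySem.Dict Int (List String)),
    (∀ digit ∈ dl, (digitConfigDict digit).length = pattern.toList.length) → InvP pm →
    InvP (dl.foldl (fun permutations digit =>
      let tmp :=
        if pattern.toList.length ≠ 2 then
          PySem.List.dedup (consB
            (some ((digitConfigDict digit).map (fun pos => sf.getD pos [])))
            pattern.toList.length [] pattern.toList)
        else consB none pattern.toList.length [] pattern.toList
      if permutations.contains digit then
        permutations.insert digit (permutations.getD digit [] ++ tmp)
      else permutations.insert digit tmp) pm) := by
  intro dl
  induction dl with
  | nil => exact fun pm _ h => h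
  | cons digit rest ih =>
    intro pm hdl hinv
    rw [List.foldl_cons]
    refine ih _ (fun d hd => hdl d (by simp [hd])) ?_
    simp only []
    have htmp : ∀ x ∈ (if pattern.toList.length ≠ 2 then
        PySem.List.dedup (consB
          (some ((digitConfigDict digit).map (fun pos => sf.getD pos [])))
          pattern.toList.length [] pattern.toList)
      else consB none pattern.toList.length [] pattern.toList),
        x.toList.length = (digitConfigDict digit).length := by
      intro x hx
      rw [hdl digit (by simp)]
      split at hx
      · exact mem_consB_len pattern _ x ((PySem.List.mem_dedup _ x).mp hx)
      · exact mem_consB_len pattern _ x hx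
    split
    · constructor
      · exact PySem.Dict.nodup_keys_insert _ _ _ hinv.1
      · intro pr hpr p hp
        rw [PySem.Dict.mem_items_insert] at hpr
        rcases hpr with hpr | ⟨hpr, _⟩
        · subst hpr
          rw [List.mem_append] at hp
          rcases hp with hp | hp
          · rcases hg : pm.get? digit with _ | old
            · rw [PySem.Dict.getD_of_get?_eq_none _ _ hg] at hp
              simp at hp
            · rw [PySem.Dict.getD_of_get?_eq_some _ _ hg] at hp
              exact hinv.2 (digit, old) (PySem.Dict.mem_items_of_get?_eq_some _ hg) p hp
          · exact htmp p hp
        · exact hinv.2 pr hpr p hp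
    · constructor
      · exact PySem.Dict.nodup_keys_insert _ _ _ hinv.1
      · intro pr hpr p hp
        rw [PySem.Dict.mem_items_insert] at hpr
        rcases hpr with hpr | ⟨hpr, _⟩
        · subst hpr
          exact htmp p hp
        · exact hinv.2 pr hpr p hp

lemma gen_inv (pattern : String) (sf pm : PySem.Dict Int (List String))
    (hdl : ∀ digit ∈ lenToDigitDict pattern.toList.length,
      (digitConfigDict digit).length = pattern.toList.length)
    (hinv : InvP pm) : InvP (genFoldB pattern sf pm) :=
  gen_inv_aux pattern sf _ pm hdl hinv

lemma invP_empty : InvP PySem.Dict.empty := by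
  constructor
  · decide
  · intro pr hpr
    simp [PySem.Dict.empty] at hpr

lemma flush_inv (pm : PySem.Dict Int (List String)) (hinv : InvP pm) :
    ∀ pr ∈ pm.items, ∀ p ∈ pr.2, p.toList.length = (digitConfigDict pr.1).length :=
  hinv.2

lemma step_eq (c : Int) (pm fp sf : PySem.Dict Int (List String)) (pattern : String)
    (hinv : InvP pm) (hk : sf.keys = sevenKeys)
    (hpre : pattern.toList.length ∈ ([0,2,3,4,5,6,7] : List Nat)) :
    stepA (c, pm, fp, sf) pattern = stepB (c, pm, fp, sf) pattern ∧
      InvP (stepA (c, pm, fp, sf) pattern).2.1 ∧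
      (stepA (c, pm, fp, sf) pattern).2.2.2.keys = sevenKeys := by
  rw [stepA_shape, stepB_shape]
  have hdl : pattern.toList.length ≠ 0 → ∀ digit ∈ lenToDigitDict pattern.toList.length,
      (digitConfigDict digit).length = pattern.toList.length := by
    intro h0
    refine len_digit_cfg pattern.toList.length ?_
    simp only [List.mem_cons, List.not_mem_nil, or_false] at hpre ⊢
    omega
  by_cases hf : (pattern.toList.length : Int) ≠ c
  · have hff := flush_fold_eq pm.items fp sf hk (flush_inv pm hinv)
    simp only [if_pos hf]
    by_cases h0 : pattern.toList.length ≠ 0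
    · simp only [if_pos h0, ← hff.1]
      exact ⟨by rw [gen_eq pattern _ _ (hdl h0)],
        by rw [gen_eq pattern _ _ (hdl h0)]; exact gen_inv pattern _ _ (hdl h0) invP_empty, hff.2⟩
    · simp only [if_neg h0, ← hff.1]
      exact ⟨trivial, invP_empty, hff.2⟩
  · simp only [if_neg hf]
    by_cases h0 : pattern.toList.length ≠ 0
    · simp only [if_pos h0]
      exact ⟨by rw [gen_eq pattern _ _ (hdl h0)],
        by rw [gen_eq pattern _ _ (hdl h0)]; exact gen_inv pattern _ _ (hdl h0) hinv, hk⟩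
    · simp only [if_neg h0]
      exact ⟨trivial, hinv, hk⟩

lemma main_fold : ∀ (l : List String) (c : Int) (pm fp sf : PySem.Dict Int (List String)),
    InvP pm → sf.keys = sevenKeys →
    (∀ s ∈ l, s.toList.length ∈ ([0,2,3,4,5,6,7] : List Nat)) →
    l.foldl stepA (c, pm, fp, sf) = l.foldl stepB (c, pm, fp, sf) := by
  intro l
  induction l with
  | nil => intros; rfl
  | cons x t ih =>
    intro c pm fp sf hinv hk hpre
    rw [List.foldl_cons, List.foldl_cons]
    obtain ⟨heq, hinv', hk'⟩ := step_eq c pm fp sf x hinv hk (hpre x (by simp))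
    rw [← heq]
    have := ih (stepA (c, pm, fp, sf) x).1 (stepA (c, pm, fp, sf) x).2.1
      (stepA (c, pm, fp, sf) x).2.2.1 (stepA (c, pm, fp, sf) x).2.2.2 hinv' hk'
      (fun s hs => hpre s (by simp [hs]))
    simpa using this

lemma initial_keys : initialSegmentFilter.keys = sevenKeys := by decide

-- ===== VERDICT (by name: the statement is the Claim_ definition above) =====
theorem applyPhaseOne_spec : Claim_equal_applyPhaseOne := by
  intro sp _ hpre
  unfold Spec_applyPhaseOne applyPhaseOne applyPhaseOne_alt
  rw [main_fold sp 2 PySem.Dict.empty PySem.Dict.empty initialSegmentFilter invP_empty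
    initial_keys hpre]
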